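-- pv_equiv track=rewrite | github.com/arnav-mishra28/Genome-Sequencing-And-Reconstruction | preprocessing/encoding.py | build_kmer_vocab
-- ===== SOURCE A (Python) =====
-- from typing import List, Tuple, Dict, Optional
--
-- def kmer_tokenize(sequence: str, k: int = 6) -> List[str]:
--     seq = sequence.upper()
--     return [seq[i : i + k] for i in range(len(seq) - k + 1)]
--
-- def build_kmer_vocab(sequences: List[str], k: int = 6) -> Dict[str, int]:
--     vocab = {"[PAD]": 0, "[MASK]": 1, "[UNK]": 2, "[CLS]": 3, "[SEP]": 4}
--     idx = len(vocab)
--     for seq in sequences: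
--         for kmer in kmer_tokenize(seq, k):
--             if kmer not in vocab:
--                 vocab[kmer] = idx
--                 idx += 1
--     return vocab
-- ===== SOURCE B (Python) =====
-- def build_kmer_vocab(sequences, k=6):
--     specials = ["[PAD]", "[MASK]", "[UNK]", "[CLS]", "[SEP]"]
--     # flattened k-mer stream of all sequences
--     stream = [u[i:i + k] for u in (s.upper() for s in sequences)
--               for i in range(len(u) - k + 1)]
--     # first-occurrence position of every distinct k-mer: sweep the stream
--     # backwards, overwriting, so the earliest position is what survives
--     first = {}
--     for pos, km in reversed(list(enumerate(stream))):
--         first[km] = pos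
--     # rank the distinct k-mers by their first occurrence
--     ordered = sorted(first, key=lambda km: first[km])
--     vocab = {t: i for i, t in enumerate(specials)}
--     body = [km for km in ordered if km not in vocab]
--     return {**vocab, **{km: 5 + j for j, km in enumerate(body)}}
-- ===== Notes on version B (the rewrite author's own statement) =====
-- stated objective: alternative
-- what changed: Instead of A's single interleaved loop that tests membership and advances a running index counter, B computes each distinct k-mer's first-occurrence position by a backward overwriting sweep over the enumerated stream, sorts the distinct k-mers by that position, and assigns indices 5+j arithmetically to the non-special ones before merging with the special-token dict.
import Mathlib
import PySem

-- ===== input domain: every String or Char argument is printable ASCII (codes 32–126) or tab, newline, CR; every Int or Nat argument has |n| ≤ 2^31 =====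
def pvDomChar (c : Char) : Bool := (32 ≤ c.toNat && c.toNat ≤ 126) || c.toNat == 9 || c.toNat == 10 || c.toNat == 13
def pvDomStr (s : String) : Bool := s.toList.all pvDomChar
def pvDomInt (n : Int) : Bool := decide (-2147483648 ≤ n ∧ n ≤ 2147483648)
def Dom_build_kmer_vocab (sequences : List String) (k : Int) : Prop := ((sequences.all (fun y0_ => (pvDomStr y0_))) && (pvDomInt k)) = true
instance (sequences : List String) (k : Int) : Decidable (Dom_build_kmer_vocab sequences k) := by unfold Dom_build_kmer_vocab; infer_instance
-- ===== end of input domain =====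

-- B replaces A's interleaved insert-and-count loop by a rank computation: a backward
-- overwriting sweep records each distinct k-mer's first-occurrence position, the k-mers are
-- sorted by that position and indices are assigned arithmetically; objective: alternative.


-- ===== PORT A =====
-- [seq[i:i+k] for i in range(len(seq)-k+1)] with seq = sequence.upper()
def kmer_tokenize (sequence : String) (k : Int) : List String :=
  let seq := PySem.Str.upper sequence
  (PySem.List.pyRange 0 (PySem.Str.len seq - k + 1) 1).map
    (fun i => PySem.Str.slice seq (some i) (some (i + k)))

-- the body of A's inner loop: if kmer not in vocab: vocab[kmer] = idx; idx += 1
def vocabStepA (st : PySem.Dict String Int × Int) (kmer : String) : PySem.Dict String Int × Int :=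
  if st.1.contains kmer then st else (st.1.insert kmer st.2, st.2 + 1)

def build_kmer_vocab (sequences : List String) (k : Int) : List (String × Int) :=
  let vocab : PySem.Dict String Int :=
    PySem.Dict.ofList [("[PAD]", 0), ("[MASK]", 1), ("[UNK]", 2), ("[CLS]", 3), ("[SEP]", 4)]
  let idx : Int := (PySem.Dict.size vocab : Int)
  let st := sequences.foldl
    (fun st seq => (kmer_tokenize seq k).foldl vocabStepA st) (vocab, idx)
  st.1.items

-- ===== PORT B =====
-- stream = [u[i:i+k] for u in (s.upper() for s in sequences) for i in range(len(u)-k+1)]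
def streamOf (sequences : List String) (k : Int) : List String :=
  (sequences.map PySem.Str.upper).flatMap (fun u =>
    (PySem.List.pyRange 0 (PySem.Str.len u - k + 1) 1).map
      (fun i => PySem.Str.slice u (some i) (some (i + k))))

-- for pos, km in reversed(list(enumerate(stream))): first[km] = pos
def firstOf (stream : List String) : PySem.Dict String Int :=
  ((PySem.List.enumerate stream 0).reverse).foldl
    (fun d p => d.insert p.2 p.1) PySem.Dict.empty

def specialsB : List String := ["[PAD]", "[MASK]", "[UNK]", "[CLS]", "[SEP]"]

def build_kmer_vocab_alt (sequences : List String) (k : Int) : List (String × Int) :=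
  let stream := streamOf sequences k
  let first := firstOf stream
  -- sorted(first, key=lambda km: first[km]); getD 0 is exact: every key of first is present
  let ordered := PySem.List.sorted first.keys (fun km => first.getD km 0)
  let vocab : PySem.Dict String Int :=
    (PySem.List.enumerate specialsB 0).foldl (fun d p => d.insert p.2 p.1) PySem.Dict.empty
  let body := ordered.filter (fun km => !(vocab.contains km))
  -- {**vocab, **{km: 5 + j for j, km in enumerate(body)}}
  (vocab.update (((PySem.List.enumerate body 0).foldl
      (fun d p => d.insert p.2 (5 + p.1)) PySem.Dict.empty).items)).items

-- ===== PRECONDITION & SPEC =====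
def Spec_build_kmer_vocab (sequences : List String) (k : Int) (out : List (String × Int)) : Prop := out = build_kmer_vocab_alt sequences k
instance (sequences : List String) (k : Int) (out : List (String × Int)) : Decidable (Spec_build_kmer_vocab sequences k out) := by unfold Spec_build_kmer_vocab; infer_instance

-- ===== CLAIM (what is proved, stated in full; the proofs are below) =====
def Claim_equal_build_kmer_vocab : Prop := ∀ (sequences : List String) (k : Int), Dom_build_kmer_vocab sequences k → Spec_build_kmer_vocab sequences k (build_kmer_vocab sequences k)

-- ===== LEMMAS AND PROOFS =====

-- entries (x0, n), (x1, n+1), … — the common normal form of both tails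
def enumVals : Int → List String → List (String × Int)
  | _, [] => []
  | n, x :: t => (x, n) :: enumVals (n + 1) t

-- the body of B-as-one-pass (used only inside the proof to normalise A)
def vocabStepB (v : PySem.Dict String Int) (kmer : String) : PySem.Dict String Int :=
  if v.contains kmer then v else v.insert kmer (PySem.Dict.size v : Int)

-- a nested for-loop is the fold over the flattened stream
theorem foldl_foldl_flatMap {α β σ : Type} (f : σ → α → σ) (g : β → List α)
    (l : List β) (init : σ) :
    l.foldl (fun st s => (g s).foldl f st) init = (l.flatMap g).foldl f init := by
  induction l generalizing init with
  | nil => rfl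
  | cons x xs ih => simp [List.flatMap_cons, List.foldl_append, ih]

theorem foldl_stepA_eq_stepB (xs : List String) (v : PySem.Dict String Int) :
    xs.foldl vocabStepA (v, (PySem.Dict.size v : Int)) =
      (xs.foldl vocabStepB v, (PySem.Dict.size (xs.foldl vocabStepB v) : Int)) := by
  induction xs generalizing v with
  | nil => rfl
  | cons x xs ih =>
    by_cases h : v.contains x = true
    · simp [List.foldl_cons, vocabStepA, vocabStepB, h, ih]
    · have hs : (PySem.Dict.size (v.insert x (PySem.Dict.size v : Int)) : Int)
          = (PySem.Dict.size v : Int) + 1 := by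
        rw [PySem.Dict.size_insert]
        simp [h]
      simp only [List.foldl_cons, vocabStepA, vocabStepB, h, if_neg, Bool.false_eq_true,
        not_false_eq_true, if_neg]
      rw [← hs, ih]

theorem setContains_def (s : PySem.Set String) (x : String) :
    PySem.Set.contains s x = s.contains x := rfl

theorem setContains_true_iff (s : PySem.Set String) (x : String) :
    PySem.Set.contains s x = true ↔ x ∈ s := by
  rw [setContains_def]; simp

theorem setContains_singleton (y z : String) :
    PySem.Set.contains [y] z = (z == y) := by
  rw [setContains_def]
  show List.elem z [y] = (z == y)
  unfold List.elem
  cases z == y <;> rfl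

theorem foldl_setAdd_eq_append (t : List String) : ∀ (acc : List String),
    t.foldl PySem.Set.add acc =
      acc ++ (PySem.List.dedup t).filter (fun y => !(PySem.Set.contains acc y)) := by
  induction t with
  | nil => intro acc; simp [PySem.List.dedup, PySem.Set.ofList]
  | cons y t ih =>
    intro acc
    have hded : PySem.List.dedup (y :: t) =
        y :: (PySem.List.dedup t).filter (fun z => !(PySem.Set.contains [y] z)) := by
      show List.foldl PySem.Set.add PySem.Set.empty (y :: t) = _
      rw [List.foldl_cons]
      have h1 : PySem.Set.add PySem.Set.empty y = [y] := rfl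
      rw [h1, ih [y]]
      rfl
    rw [List.foldl_cons]
    by_cases hc : PySem.Set.contains acc y = true
    · have hmem : y ∈ acc := (setContains_true_iff acc y).mp hc
      have hadd : PySem.Set.add acc y = acc := by rw [PySem.Set.add, if_pos hc]
      rw [hadd, ih acc, hded]
      simp only [List.filter_cons, hc, Bool.not_true, List.filter_filter]
      congr 1
      apply List.filter_congr
      intro z _
      rw [setContains_singleton]
      by_cases hz : z = y
      · subst hz; simp [hmem]
      · simp [hz]
    · have hadd : PySem.Set.add acc y = acc ++ [y] := by rw [PySem.Set.add, if_neg hc]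
      rw [hadd, ih (acc ++ [y]), hded]
      have hnmem : y ∉ acc := fun h => hc ((setContains_true_iff acc y).mpr h)
      have hPy : (!(PySem.Set.contains acc y)) = true := by simp [hnmem]
      simp only [List.filter_cons, hPy, List.filter_filter, List.append_assoc,
        List.singleton_append]
      congr 2
      apply List.filter_congr
      intro z _
      rw [setContains_singleton, setContains_def, setContains_def]
      by_cases hz : z = y
      · subst hz
        have : ¬ (z ∈ acc) := fun h => hc ((setContains_true_iff acc z).mpr h)
        simp_all
      · simp [hz]

theorem dedup_cons (x : String) (t : List String) :
    PySem.List.dedup (x :: t) = x :: (PySem.List.dedup t).filter (fun y => !(x == y)) := by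
  have hded : PySem.List.dedup (x :: t) =
      x :: (PySem.List.dedup t).filter (fun z => !(PySem.Set.contains [x] z)) := by
    show List.foldl PySem.Set.add PySem.Set.empty (x :: t) = _
    rw [List.foldl_cons]
    have h1 : PySem.Set.add PySem.Set.empty x = [x] := rfl
    rw [h1, foldl_setAdd_eq_append t [x]]
    rfl
  rw [hded]
  congr 1
  apply List.filter_congr
  intro z _
  rw [setContains_singleton]
  by_cases hz : z = x
  · subst hz; simp
  · simp [hz, Ne.symm hz]

-- A's loop in normal form: old items, then the fresh k-mers numbered from size v
theorem foldB_items (xs : List String) : ∀ (v : PySem.Dict String Int),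
    (xs.foldl vocabStepB v).items =
      v.items ++ enumVals (PySem.Dict.size v : Int)
        ((PySem.List.dedup xs).filter (fun km => !(v.contains km))) := by
  induction xs with
  | nil => intro v; simp [PySem.List.dedup, PySem.Set.ofList, enumVals]
  | cons x t ih =>
    intro v
    rw [List.foldl_cons, dedup_cons]
    by_cases h : v.contains x = true
    · have hstep : vocabStepB v x = v := by rw [vocabStepB, if_pos h]
      rw [hstep, ih v]
      congr 1
      simp only [List.filter_cons, h, Bool.not_true, List.filter_filter]
      congr 1
      apply List.filter_congr
      intro z _
      by_cases hz : z = x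
      · subst hz; simp [h]
      · simp [Ne.symm hz]
    · have hf : v.contains x = false := by revert h; cases v.contains x <;> simp
      have hstep : vocabStepB v x = v.insert x (PySem.Dict.size v : Int) := by
        rw [vocabStepB, if_neg h]
      rw [hstep, ih]
      rw [PySem.Dict.items_insert_of_not_contains v _ hf]
      have hsz : (PySem.Dict.size (v.insert x (PySem.Dict.size v : Int)) : Int)
          = (PySem.Dict.size v : Int) + 1 := by
        rw [PySem.Dict.size_insert]; simp [hf]
      rw [hsz]
      simp only [List.filter_cons, hf, Bool.not_false, if_true, List.append_assoc, List.singleton_append]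
      have hEV : enumVals ((PySem.Dict.size v : Int)) (x :: (List.filter (fun km => !(v.contains km)) (List.filter (fun y => !(x == y)) (PySem.List.dedup t)))) = (x, (PySem.Dict.size v : Int)) :: enumVals ((PySem.Dict.size v : Int) + 1) (List.filter (fun km => !(v.contains km)) (List.filter (fun y => !(x == y)) (PySem.List.dedup t))) := rfl
      rw [hEV]
      congr 2
      simp only [List.filter_filter]
      congr 1
      apply List.filter_congr
      intro z _
      by_cases hz : z = x
      · subst hz; simp [PySem.Dict.contains_insert_self]
      · rw [PySem.Dict.contains_insert]
        have h1 : (z == x) = false := by simp [hz]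
        have h2 : (x == z) = false := by simp [Ne.symm hz]
        rw [h1, h2]
        cases v.contains z <;> rfl

-- keys of the backward sweep = distinct k-mers in reversed first-occurrence order
theorem keys_firstOf (stream : List String) :
    (firstOf stream).keys = PySem.List.dedup stream.reverse := by
  show (((PySem.List.enumerate stream 0).reverse).foldl
      (fun d p => d.insert p.2 p.1) PySem.Dict.empty).keys = _
  have h := PySem.Dict.keys_foldl_insert_key (ν := Int)
    ((PySem.List.enumerate stream 0).reverse) (fun p => p.2) (fun _ p => p.1)
    PySem.Dict.empty
  simp only at h
  rw [h]
  have hm : List.map (fun (p : Int × String) => p.2) ((PySem.List.enumerate stream 0).reverse)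
      = stream.reverse := by
    rw [List.map_reverse, PySem.List.map_snd_enumerate]
  rw [hm]
  rfl

-- value of the backward sweep at a key = position of the FIRST matching pair
theorem getD_revfold (ps : List (Int × String)) (d : PySem.Dict String Int) (km : String) :
    ((ps.reverse).foldl (fun d p => d.insert p.2 p.1) d).getD km 0 =
      (match ps.find? (fun p => p.2 == km) with
      | some p => p.1
      | none => d.getD km 0) := by
  induction ps with
  | nil => simp
  | cons p rest ih =>
    rw [List.reverse_cons, List.foldl_append]
    simp only [List.foldl_cons, List.foldl_nil]
    rw [PySem.Dict.getD_insert]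
    rw [List.find?_cons]
    by_cases hp : p.2 = km
    · have : (p.2 == km) = true := by simp [hp]
      rw [this]
      simp [hp]
    · have : (p.2 == km) = false := by simp [hp]
      rw [this]
      rw [if_neg (fun hk => hp hk.symm)]
      exact ih

theorem find?_enumerate (xs : List String) : ∀ (s : Int) (km : String), km ∈ xs →
    (PySem.List.enumerate xs s).find? (fun p => p.2 == km)
      = some (s + (xs.idxOf km : Int), km) := by
  induction xs with
  | nil => intro s km h; cases h
  | cons x t ih =>
    intro s km h
    rw [PySem.List.enumerate_cons, List.find?_cons]
    by_cases hx : x = km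
    · subst hx
      simp [List.idxOf_cons_self]
    · have hb : ((s, x).2 == km) = false := by simp [hx]
      rw [hb]
      have hmem : km ∈ t := by
        rcases List.mem_cons.mp h with h1 | h1
        · exact absurd h1.symm hx
        · exact h1
      rw [ih (s + 1) km hmem]
      rw [List.idxOf_cons_ne t hx]
      push_cast
      ring_nf

theorem getD_firstOf (stream : List String) (km : String) (h : km ∈ stream) :
    (firstOf stream).getD km 0 = (stream.idxOf km : Int) := by
  show (((PySem.List.enumerate stream 0).reverse).foldl
      (fun d p => d.insert p.2 p.1) PySem.Dict.empty).getD km 0 = _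
  rw [getD_revfold, find?_enumerate stream 0 km h]
  simp

-- along the first-occurrence dedup, first positions strictly increase
theorem pairwise_dedup_idxOf (xs : List String) :
    (PySem.List.dedup xs).Pairwise (fun a b => xs.idxOf a < xs.idxOf b) := by
  induction xs with
  | nil => simp [PySem.List.dedup, PySem.Set.ofList]
  | cons x t ih =>
    rw [dedup_cons, List.pairwise_cons]
    constructor
    · intro b hb
      have hbx : x ≠ b := by
        rcases List.mem_filter.mp hb with ⟨_, hpb⟩
        simpa using hpb
      rw [List.idxOf_cons_self, List.idxOf_cons_ne (a := b) (b := x) t hbx]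
      exact Nat.succ_pos _
    · have hpf : (List.filter (fun y => !(x == y)) (PySem.List.dedup t)).Pairwise
          (fun a b => t.idxOf a < t.idxOf b) := ih.filter _
      refine hpf.imp_of_mem ?_
      intro a b ha hb hab
      have hax : x ≠ a := by simpa using (List.mem_filter.mp ha).2
      have hbx : x ≠ b := by simpa using (List.mem_filter.mp hb).2
      rw [List.idxOf_cons_ne (a := a) (b := x) t hax,
        List.idxOf_cons_ne (a := b) (b := x) t hbx]
      exact Nat.succ_lt_succ hab

-- sorting the distinct k-mers by first position recovers first-occurrence order
theorem sorted_firstOf (stream : List String) :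
    PySem.List.sorted (firstOf stream).keys (fun km => (firstOf stream).getD km 0)
      = PySem.List.dedup stream := by
  apply PySem.List.sorted_eq_of_perm_of_pairwise_lt
  · rw [keys_firstOf]
    apply (List.perm_ext_iff_of_nodup (PySem.List.nodup_dedup _) (PySem.List.nodup_dedup _)).mpr
    intro y
    rw [PySem.List.mem_dedup, PySem.List.mem_dedup, List.mem_reverse]
  · refine (pairwise_dedup_idxOf stream).imp_of_mem ?_
    intro a b ha hb hab
    have ha' : a ∈ stream := (PySem.List.mem_dedup _ _).mp ha
    have hb' : b ∈ stream := (PySem.List.mem_dedup _ _).mp hb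
    rw [getD_firstOf stream a ha', getD_firstOf stream b hb']
    exact_mod_cast hab

theorem map_enum_eq_enumVals (body : List String) : ∀ (s : Int),
    (PySem.List.enumerate body s).map (fun p => (p.2, 5 + p.1)) = enumVals (5 + s) body := by
  induction body with
  | nil => intro s; rfl
  | cons x t ih =>
    intro s
    rw [PySem.List.enumerate_cons, List.map_cons, ih (s + 1)]
    show (x, 5 + s) :: enumVals (5 + (s + 1)) t = (x, 5 + s) :: enumVals ((5 + s) + 1) t
    congr 1
    ring_nf

theorem map_fst_enumVals (l : List String) : ∀ (n : Int),
    (enumVals n l).map Prod.fst = l := by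
  induction l with
  | nil => intro n; rfl
  | cons x t ih => intro n; simp [enumVals, ih]

-- ===== VERDICT (by name: the statement is the Claim_ definition above) =====
theorem build_kmer_vocab_spec : Claim_equal_build_kmer_vocab := by
  intro sequences k _
  unfold Spec_build_kmer_vocab build_kmer_vocab build_kmer_vocab_alt
  simp only
  set V0 : PySem.Dict String Int :=
    PySem.Dict.ofList [("[PAD]", 0), ("[MASK]", 1), ("[UNK]", 2), ("[CLS]", 3), ("[SEP]", 4)] with hV0
  set S := streamOf sequences k with hS
  -- B's special-token dict is A's literal dict
  have hvocab : (PySem.List.enumerate specialsB 0).foldl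
      (fun (d : PySem.Dict String Int) p => d.insert p.2 p.1) PySem.Dict.empty = V0 := by decide
  -- A's nested loop = fold over the flattened stream
  have hflat : sequences.foldl (fun st seq => (kmer_tokenize seq k).foldl vocabStepA st)
        (V0, (PySem.Dict.size V0 : Int))
      = (sequences.flatMap (fun s => kmer_tokenize s k)).foldl vocabStepA
        (V0, (PySem.Dict.size V0 : Int)) := foldl_foldl_flatMap _ _ _ _
  have hSeq : S = sequences.flatMap (fun s => kmer_tokenize s k) := by
    rw [hS, streamOf, List.flatMap_map]
    rfl
  have hA : (sequences.foldl (fun st seq => (kmer_tokenize seq k).foldl vocabStepA st)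
        (V0, (PySem.Dict.size V0 : Int))).1.items
      = V0.items ++ enumVals (PySem.Dict.size V0 : Int)
          ((PySem.List.dedup S).filter (fun km => !(V0.contains km))) := by
    rw [hflat, ← hSeq, foldl_stepA_eq_stepB, foldB_items]
  rw [hA, hvocab, sorted_firstOf]
  set body := (PySem.List.dedup S).filter (fun km => !(V0.contains km)) with hbody
  have hbodyNodup : body.Nodup := (PySem.List.nodup_dedup S).filter _
  -- the inner comprehension dict: fresh distinct keys append in order
  have hinner : ((PySem.List.enumerate body 0).foldl
      (fun (d : PySem.Dict String Int) p => d.insert p.2 (5 + p.1)) PySem.Dict.empty).items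
      = enumVals 5 body := by
    have h1 : ∀ a ∈ PySem.List.enumerate body 0,
        (PySem.Dict.empty : PySem.Dict String Int).contains a.2 = false := by
      intro a _; rfl
    have h2 : ((PySem.List.enumerate body 0).map (fun p => p.2)).Nodup := by
      rw [PySem.List.map_snd_enumerate]; exact hbodyNodup
    have := PySem.Dict.items_foldl_insert_fresh (PySem.List.enumerate body 0)
      (fun p => p.2) (fun p => 5 + p.1) PySem.Dict.empty h1 h2
    simpa [map_enum_eq_enumVals body 0] using this
  rw [hinner]
  -- the merge {**vocab, **inner}: fresh distinct keys append
  have h1 : ∀ p ∈ enumVals 5 body, V0.contains p.1 = false := by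
    intro p hp
    have hp1 : p.1 ∈ body := by
      rw [← map_fst_enumVals body 5]
      exact List.mem_map_of_mem hp
    have := (List.mem_filter.mp hp1).2
    revert this
    cases hc : V0.contains p.1 <;> simp
  have h2 : ((enumVals 5 body).map Prod.fst).Nodup := by
    rw [map_fst_enumVals]; exact hbodyNodup
  have hupd := PySem.Dict.items_foldl_insert_fresh (enumVals 5 body)
    Prod.fst Prod.snd V0 h1 h2
  show V0.items ++ enumVals ((PySem.Dict.size V0 : Nat) : Int) body
      = (V0.update (enumVals 5 body)).items
  have hsz : ((PySem.Dict.size V0 : Nat) : Int) = 5 := by decide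
  rw [hsz, PySem.Dict.update]
  rw [hupd]
  simp
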